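-- pv_equiv track=rewrite | github.com/lengocduc195/CTC-SpeechRefinement | ctc_speech_refinement/core/eda/error_analysis.py | is_suffix_error
-- ===== SOURCE A (Python) =====
-- def is_suffix_error(ref_word: str, hyp_word: str) -> bool:
--     """
--     Check if there's a suffix error between reference and hypothesis words.
--
--     Args:
--         ref_word: Reference word.
--         hyp_word: Hypothesis word.
--
--     Returns:
--         True if there's a suffix error, False otherwise.
--     """
--     # Check if one word is a prefix of the other with a different suffix
--     min_length = min(len(ref_word), len(hyp_word))
--     if min_length < 3:
--         return False
--
--     # Check if they share a common stem (at least 3 characters)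
--     common_prefix_length = 0
--     for i in range(min_length):
--         if ref_word[i] == hyp_word[i]:
--             common_prefix_length += 1
--         else:
--             break
--
--     return common_prefix_length >= 3 and common_prefix_length < min(len(ref_word), len(hyp_word))
-- ===== SOURCE B (Python) =====
-- def is_suffix_error(ref_word: str, hyp_word: str) -> bool:
--     min_length = min(len(ref_word), len(hyp_word))
--     if min_length < 3:
--         return False
--     return ref_word[:3] == hyp_word[:3] and ref_word[:min_length] != hyp_word[:min_length]
-- ===== Notes on version B (the rewrite author's own statement) =====
-- stated objective: simpler
-- what changed: Replaced the explicit character-counting common-prefix loop with two direct slice comparisons: ref[:3]==hyp[:3] captures common prefix >= 3 and ref[:min]!=hyp[:min] captures that the shorter word is not a prefix of the other.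
import Mathlib
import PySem

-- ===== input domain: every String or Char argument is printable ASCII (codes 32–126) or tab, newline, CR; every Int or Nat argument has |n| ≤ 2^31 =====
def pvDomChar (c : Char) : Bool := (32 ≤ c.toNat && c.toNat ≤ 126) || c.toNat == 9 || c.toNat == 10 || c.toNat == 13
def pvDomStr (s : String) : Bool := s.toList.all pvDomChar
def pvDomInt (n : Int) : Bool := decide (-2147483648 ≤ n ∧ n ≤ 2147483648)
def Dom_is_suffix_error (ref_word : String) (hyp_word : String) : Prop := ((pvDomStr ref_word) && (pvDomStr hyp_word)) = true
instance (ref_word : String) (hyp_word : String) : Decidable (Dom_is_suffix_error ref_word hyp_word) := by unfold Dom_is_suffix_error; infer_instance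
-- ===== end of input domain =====

-- B replaces A's explicit character-counting common-prefix loop by two slice comparisons (objective: simpler).


-- ===== PORT A =====
-- A's loop: for i in range(min_length): if ref[i] == hyp[i]: count += 1 else: break.
-- Transliterated as sequential recursion over the two character lists with fuel n = min_length
-- (the loop reads positions 0.. in order and stops at the first mismatch).
def pvLoopA (r h : List Char) (n : Nat) : Nat :=
  match n, r, h with
  | Nat.succ n', a :: rt, b :: ht => if a == b then 1 + pvLoopA rt ht n' else 0
  | _, _, _ => 0

def is_suffix_error (ref_word : String) (hyp_word : String) : Bool :=
  let rl := ref_word.toList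
  let hl := hyp_word.toList
  let min_length := min rl.length hl.length
  if min_length < 3 then false
  else
    let common_prefix_length := pvLoopA rl hl min_length
    decide (3 ≤ common_prefix_length) &&
      decide (common_prefix_length < min rl.length hl.length)

-- ===== PORT B =====
def is_suffix_error_alt (ref_word : String) (hyp_word : String) : Bool :=
  let rl := ref_word.toList
  let hl := hyp_word.toList
  let min_length := min rl.length hl.length
  if min_length < 3 then false
  else (rl.take 3 == hl.take 3) && !(rl.take min_length == hl.take min_length)

-- ===== PRECONDITION & SPEC =====
def Spec_is_suffix_error (ref_word : String) (hyp_word : String) (out : Bool) : Prop := out = is_suffix_error_alt ref_word hyp_word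
instance (ref_word : String) (hyp_word : String) (out : Bool) : Decidable (Spec_is_suffix_error ref_word hyp_word out) := by unfold Spec_is_suffix_error; infer_instance

-- ===== CLAIM (what is proved, stated in full; the proofs are below) =====
def Claim_equal_is_suffix_error : Prop := ∀ (ref_word : String) (hyp_word : String), Dom_is_suffix_error ref_word hyp_word → Spec_is_suffix_error ref_word hyp_word (is_suffix_error ref_word hyp_word)

-- ===== LEMMAS AND PROOFS =====

-- The loop's counter reaches k exactly when the first k characters agree (k within both lists and the fuel).
theorem pvLoopA_ge (k : Nat) : ∀ (r h : List Char) (n : Nat), k ≤ n → k ≤ r.length → k ≤ h.length →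
    (k ≤ pvLoopA r h n ↔ r.take k = h.take k) := by
  induction k with
  | zero => intro r h n _ _ _; simp
  | succ k ih =>
    intro r h n hn hr hh
    match n, r, h with
    | Nat.succ n', a :: rt, b :: ht =>
      simp only [pvLoopA]
      by_cases hab : a = b
      · subst hab
        simp only [beq_self_eq_true, if_pos]
        rw [List.take_succ_cons, List.take_succ_cons]
        constructor
        · intro hk
          have : k ≤ pvLoopA rt ht n' := by omega
          have := (ih rt ht n' (by omega) (by simpa using hr) (by simpa using hh)).mp this
          simp [this]
        · intro hk
          have : rt.take k = ht.take k := by simpa using hk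
          have := (ih rt ht n' (by omega) (by simpa using hr) (by simpa using hh)).mpr this
          omega
      · simp [hab, List.take_succ_cons]

theorem is_suffix_error_eq_alt (ref_word hyp_word : String) :
    is_suffix_error ref_word hyp_word = is_suffix_error_alt ref_word hyp_word := by
  simp only [is_suffix_error, is_suffix_error_alt]
  by_cases h3 : min ref_word.toList.length hyp_word.toList.length < 3
  · rw [if_pos h3, if_pos h3]
  · rw [if_neg h3, if_neg h3]
    have hmr : min ref_word.toList.length hyp_word.toList.length ≤ ref_word.toList.length :=
      Nat.min_le_left _ _
    have hmh : min ref_word.toList.length hyp_word.toList.length ≤ hyp_word.toList.length :=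
      Nat.min_le_right _ _
    have hge3 := pvLoopA_ge 3 ref_word.toList hyp_word.toList
      (min ref_word.toList.length hyp_word.toList.length) (by omega) (by omega) (by omega)
    have hgem := pvLoopA_ge (min ref_word.toList.length hyp_word.toList.length)
      ref_word.toList hyp_word.toList (min ref_word.toList.length hyp_word.toList.length)
      (le_refl _) hmr hmh
    have e1 : (decide (3 ≤ pvLoopA ref_word.toList hyp_word.toList
        (min ref_word.toList.length hyp_word.toList.length)))
        = (ref_word.toList.take 3 == hyp_word.toList.take 3) := by
      rw [Bool.eq_iff_iff]; simp only [decide_eq_true_eq, beq_iff_eq]; exact hge3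
    have e2 : (decide (pvLoopA ref_word.toList hyp_word.toList
        (min ref_word.toList.length hyp_word.toList.length)
        < min ref_word.toList.length hyp_word.toList.length))
        = !(ref_word.toList.take (min ref_word.toList.length hyp_word.toList.length)
            == hyp_word.toList.take (min ref_word.toList.length hyp_word.toList.length)) := by
      rw [Bool.eq_iff_iff]
      simp only [decide_eq_true_eq, Bool.not_eq_eq_eq_not, Bool.not_true, beq_eq_false_iff_ne,
        ne_eq, ← hgem]
      omega
    rw [e1, e2]

-- ===== VERDICT (by name: the statement is the Claim_ definition above) =====
theorem is_suffix_error_spec : Claim_equal_is_suffix_error := by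
  intro ref_word hyp_word _
  unfold Spec_is_suffix_error
  exact is_suffix_error_eq_alt ref_word hyp_word
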